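-- pv_equiv track=rewrite | github.com/katiemartinezz/Market-Clearing-Prices | market_strategy.py | find_constrained_set
-- ===== SOURCE A (Python) =====
-- from collections import Counter
--
-- def find_constrained_set(best): # based on best_payoffs
--     constrained_sellers = set()
--     list_seller = []
--     for seller, payoff in best.values():
--         list_seller.append(seller)
--     count = Counter(list_seller) # count seller popularity
--     elements_more_than_one = {key: value for key, value in count.items() if value > 1} # get popular sellers
--     for i in elements_more_than_one:
--         constrained_sellers.add(i)
--     return constrained_sellers
-- ===== SOURCE B (Python) =====
-- def find_constrained_set(best):  # based on best_payoffs
--     # No counting at all: a seller is constrained exactly when it occurs again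
--     # later in the list of sellers; consume the list from the front and test
--     # membership in the remaining suffix.
--     constrained_sellers = set()
--     sellers = [seller for seller, payoff in best.values()]
--     while sellers:
--         seller = sellers.pop(0)
--         if seller in sellers:
--             constrained_sellers.add(seller)
--     return constrained_sellers
-- ===== Notes on version B (the rewrite author's own statement) =====
-- stated objective: alternative
-- what changed: Replaces the list-build + Counter + dict-comprehension-filter + collect-keys pipeline with a single consume-the-list loop that never computes counts: a seller is added exactly when it still occurs in the remaining suffix.
import Mathlib
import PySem

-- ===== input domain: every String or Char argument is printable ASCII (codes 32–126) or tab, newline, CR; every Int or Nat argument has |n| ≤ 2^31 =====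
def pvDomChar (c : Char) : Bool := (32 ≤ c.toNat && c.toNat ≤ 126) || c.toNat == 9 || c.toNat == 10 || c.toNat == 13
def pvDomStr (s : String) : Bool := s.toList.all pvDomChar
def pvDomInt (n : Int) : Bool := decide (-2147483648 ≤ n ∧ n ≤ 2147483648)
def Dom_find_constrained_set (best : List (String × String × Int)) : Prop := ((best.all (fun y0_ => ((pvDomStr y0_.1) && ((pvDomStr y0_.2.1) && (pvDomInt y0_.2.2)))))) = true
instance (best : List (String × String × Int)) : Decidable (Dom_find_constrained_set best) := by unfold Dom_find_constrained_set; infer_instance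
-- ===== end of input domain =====

-- B replaces A's list-build + Counter + dict-filter + collect pipeline by a single count-free
-- loop testing membership in the remaining suffix (alternative decomposition, not faster).


-- ===== PORT A =====
def find_constrained_set (best : List (String × String × Int)) : List String :=
  let d : PySem.Dict String (String × Int) := PySem.Dict.ofList best
  -- constrained_sellers = set(); list_seller = []; for seller, payoff in best.values(): list_seller.append(seller)
  let list_seller : List String := d.values.foldl (fun l sp => l ++ [sp.1]) []
  -- count = Counter(list_seller)
  let count : PySem.Dict String Int := PySem.Dict.counter list_seller
  -- elements_more_than_one = {key: value for key, value in count.items() if value > 1}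
  let elements_more_than_one : PySem.Dict String Int :=
    count.items.foldl (fun m kv => if kv.2 > 1 then m.insert kv.1 kv.2 else m) PySem.Dict.empty
  -- for i in elements_more_than_one: constrained_sellers.add(i)
  elements_more_than_one.keys.foldl (fun cs i => PySem.Set.add cs i) PySem.Set.empty

-- ===== PORT B =====
-- while sellers: seller = sellers.pop(0); if seller in sellers: constrained_sellers.add(seller)
def pvAltLoop (sellers : List String) (constrained : PySem.Set String) : PySem.Set String :=
  match sellers with
  | [] => constrained
  | seller :: rest => pvAltLoop rest (if seller ∈ rest then PySem.Set.add constrained seller else constrained)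

def find_constrained_set_alt (best : List (String × String × Int)) : List String :=
  let sellers : List String := (PySem.Dict.ofList best).values.map (fun sp => sp.1)
  pvAltLoop sellers PySem.Set.empty

-- ===== PRECONDITION & SPEC =====
def Spec_find_constrained_set (best : List (String × String × Int)) (out : List String) : Prop := out = find_constrained_set_alt best
instance (best : List (String × String × Int)) (out : List String) : Decidable (Spec_find_constrained_set best out) := by unfold Spec_find_constrained_set; infer_instance

-- ===== CLAIM (what is proved, stated in full; the proofs are below) =====
def Claim_equal_find_constrained_set : Prop := ∀ (best : List (String × String × Int)), Dom_find_constrained_set best → Spec_find_constrained_set best (find_constrained_set best)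

-- ===== LEMMAS AND PROOFS =====

-- the canonical value both ports compute: the distinct sellers, in first-occurrence order,
-- that occur more than once in L
def pvDup (L : List String) : List String :=
  (PySem.Set.ofList L).filter (fun s => decide (1 < L.count s))

lemma find_constrained_set_eq_pvDup (best : List (String × String × Int)) :
    find_constrained_set best = pvDup ((PySem.Dict.ofList best).values.map (fun sp => sp.1)) := by
  unfold find_constrained_set pvDup
  set L := (PySem.Dict.ofList best).values.map (fun sp => sp.1) with hL
  have h1 : (PySem.Dict.ofList best).values.foldl (fun l sp => l ++ [sp.1]) [] = L := by
    simp only [PySem.List.foldl_append_singleton_eq_map, List.nil_append, hL]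
  simp only [h1]
  -- the dict comprehension: fold over filtered counter items, all keys fresh and distinct
  simp only [PySem.List.foldl_ite_eq_foldl_filter]
  rw [PySem.Dict.items_counter]
  have hfilt : ((PySem.Set.ofList L).map (fun k => (k, (L.count k : Int)))).filter
        (fun kv => decide (kv.2 > 1))
      = ((PySem.Set.ofList L).filter (fun s => decide (1 < L.count s))).map
        (fun k => (k, (L.count k : Int))) := by
    rw [List.filter_map]
    congr 1
    apply List.filter_congr
    intro x _
    simp
  rw [hfilt]
  set S := (PySem.Set.ofList L).filter (fun s => decide (1 < L.count s)) with hS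
  have hnd : S.Nodup := (PySem.Set.nodup_ofList L).filter _
  have hitems : (S.map (fun k => (k, (L.count k : Int)))).foldl
        (fun m kv => m.insert kv.1 kv.2) PySem.Dict.empty
      = PySem.Dict.mk (S.map (fun k => (k, (L.count k : Int)))) := by
    have := PySem.Dict.items_foldl_insert_fresh (S.map (fun k => (k, (L.count k : Int))))
        (fun kv => kv.1) (fun kv => kv.2) PySem.Dict.empty
        (by intro a _; simp [PySem.Dict.contains_empty])
        (by simpa [Function.comp_def] using hnd)
    apply PySem.Dict.ext
    simpa [PySem.Dict.items, Function.comp_def] using this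
  rw [hitems]
  have hkeys : (PySem.Dict.mk (S.map (fun k => (k, (L.count k : Int))))).keys = S := by
    simp [PySem.Dict.keys, List.map_map, Function.comp_def]
  rw [hkeys]
  simp only [PySem.Set.empty]
  rw [← PySem.Set.ofList_eq_foldl, PySem.Set.ofList_eq_self_of_nodup S hnd]

-- B-side: the elements added by the loop, in order — one per position whose element recurs later
def pvAhead : List String → List String
  | [] => []
  | s :: rest => (if s ∈ rest then [s] else []) ++ pvAhead rest

lemma pvAltLoop_eq_update (L : List String) :
    ∀ acc : PySem.Set String, pvAltLoop L acc = PySem.Set.update acc (pvAhead L) := by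
  induction L with
  | nil => intro acc; simp [pvAltLoop, pvAhead, PySem.Set.update_eq_foldl]
  | cons s rest ih =>
      intro acc
      simp only [pvAltLoop, pvAhead, PySem.Set.update_append, ih]
      by_cases h : s ∈ rest
      · simp [h, PySem.Set.update_eq_foldl]
      · simp [h, PySem.Set.update_eq_foldl]

lemma ofList_pvAhead (L : List String) : PySem.Set.ofList (pvAhead L) = pvDup L := by
  induction L with
  | nil => simp [pvAhead, pvDup, PySem.Set.ofList_nil]
  | cons s rest ih =>
      unfold pvDup at ih ⊢
      rw [PySem.Set.ofList_cons s rest, PySem.Set.discard.eq_1]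
      by_cases h : s ∈ rest
      · have hc : (1 < (s :: rest).count s) := by
          simp [List.count_pos_iff.mpr h]
        have hA : pvAhead (s :: rest) = s :: pvAhead rest := by simp [pvAhead, h]
        rw [hA, PySem.Set.ofList_cons, PySem.Set.discard.eq_1, ih,
          List.filter_cons_of_pos (by simpa using hc)]
        congr 1
        rw [List.filter_filter, List.filter_filter]
        apply List.filter_congr
        intro x _
        by_cases hx : x = s
        · simp [hx]
        · simp [List.count_cons, if_neg (fun hh : s = x => hx hh.symm), Bool.and_comm]
      · have hc : ¬ (1 < (s :: rest).count s) := by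
          simp [List.count_eq_zero_of_not_mem h]
        have hA : pvAhead (s :: rest) = pvAhead rest := by simp [pvAhead, h]
        rw [List.filter_cons_of_neg (by simpa using hc), hA, ih, List.filter_filter]
        apply List.filter_congr
        intro x hx
        have hxs : x ≠ s := fun hh => h (hh ▸ (PySem.Set.mem_ofList rest x).mp hx)
        simp [List.count_cons, hxs, if_neg (fun hh : s = x => hxs hh.symm), Bool.and_comm]

lemma find_constrained_set_alt_eq_pvDup (best : List (String × String × Int)) :
    find_constrained_set_alt best = pvDup ((PySem.Dict.ofList best).values.map (fun sp => sp.1)) := by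
  unfold find_constrained_set_alt
  rw [pvAltLoop_eq_update, PySem.Set.update_empty, ofList_pvAhead]

-- ===== VERDICT (by name: the statement is the Claim_ definition above) =====
theorem find_constrained_set_spec : Claim_equal_find_constrained_set := by
  intro best _
  unfold Spec_find_constrained_set
  rw [find_constrained_set_eq_pvDup, find_constrained_set_alt_eq_pvDup]
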